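-- pv_equiv track=rewrite | github.com/TobyRoberts1/compx216-A4 | assignment4.py | build_n_gram
-- ===== SOURCE A (Python) =====
-- def build_n_gram(sequence, n):
--     # Task 1.3
--     # Return an n-gram model.
--     # Replace the line below with your code.
--     ngram = {}
--     # loop through sequence
--     for i in range(len(sequence) - (n - 1)):
--         #create key with n-1 tokens in it
--         key = tuple(sequence[i:i + n - 1])
--         #get the correct token
--         token = sequence[i + (n - 1)]
--         #init dict key if not already
--         if key not in ngram:
--             ngram[key] = {}
--         #update count for token
--         ngram[key][token] = ngram[key].get(token, 0) + 1
--     return ngram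
-- ===== SOURCE B (Python) =====
-- def build_n_gram(sequence, n):
--     # Two staged passes: flat-count whole windows, then regroup into the nested model.
--     if n < 1:
--         return {}
--     counts = {}
--     for i in range(len(sequence) - n + 1):
--         w = tuple(sequence[i:i + n])
--         counts[w] = counts.get(w, 0) + 1
--     model = {}
--     for w, c in counts.items():
--         model.setdefault(w[:-1], {})[w[-1]] = c
--     return model
-- ===== Notes on version B (the rewrite author's own statement) =====
-- stated objective: alternative
-- what changed: B replaces A's single pass that increments nested per-prefix dicts in place by two staged passes: a flat counter keyed by the whole n-window, then a regrouping pass over the counter's items that builds the nested model, writing each final count once.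
-- intended difference: For n <= 0 (on sequences long enough that A does not raise) A returns a model counted from negative-index wraparound tokens (e.g. A(['a'], 0) == {(): {'a': 2}}), while B returns the empty model {}, the intended value since a text has no n-grams for n <= 0. — e.g. on build_n_gram(["a"], 0): A returns [([], [("a", 2)])], B returns []
import Mathlib
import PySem

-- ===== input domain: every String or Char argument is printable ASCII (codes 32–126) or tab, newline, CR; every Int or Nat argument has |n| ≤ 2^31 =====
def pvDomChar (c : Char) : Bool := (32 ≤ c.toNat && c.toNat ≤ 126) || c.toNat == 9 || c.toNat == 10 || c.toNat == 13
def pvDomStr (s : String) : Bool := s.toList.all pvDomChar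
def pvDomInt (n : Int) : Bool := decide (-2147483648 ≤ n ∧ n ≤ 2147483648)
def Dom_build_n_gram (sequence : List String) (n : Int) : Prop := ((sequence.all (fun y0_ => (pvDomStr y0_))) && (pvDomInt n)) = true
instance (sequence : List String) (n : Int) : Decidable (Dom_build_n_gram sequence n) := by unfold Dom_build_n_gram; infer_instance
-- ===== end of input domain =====

-- B replaces A's single pass of in-place nested increments by two staged passes — a flat
-- counter keyed by the whole n-window, then a regrouping pass over the counter's items that
-- writes each final count once (alternative decomposition, same cost); on n <= 0 A miscounts
-- via negative-index wraparound while B returns the empty model (see D_).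


-- ===== PORT A =====
-- for i in range(len(sequence) - (n - 1)): key = tuple(sequence[i:i+n-1]); token = sequence[i+(n-1)];
-- if key not in ngram: ngram[key] = {};  ngram[key][token] = ngram[key].get(token, 0) + 1
def build_n_gram (sequence : List String) (n : Int) : List (List String × List (String × Int)) :=
  let step := fun (ngram : PySem.Dict (List String) (PySem.Dict String Int)) (i : Int) =>
    let key := PySem.List.slice sequence (some i) (some (i + n - 1))
    match PySem.List.pyGet? sequence (i + (n - 1)) with
    | none => ngram   -- Python raises IndexError here; excluded by Pre_
    | some token =>
      let ngram1 := if ngram.contains key then ngram else ngram.insert key PySem.Dict.empty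
      let inner := ngram1.getD key PySem.Dict.empty
      ngram1.insert key (inner.insert token (inner.getD token 0 + 1))
  ((PySem.List.pyRange 0 (PySem.List.len sequence - (n - 1)) 1).foldl step PySem.Dict.empty).items.map
    (fun p => (p.1, p.2.items))

-- ===== PORT B =====
-- if n < 1: return {};  pass 1: counts[w] = counts.get(w, 0) + 1 over the windows w = sequence[i:i+n];
-- pass 2: for w, c in counts.items(): model.setdefault(w[:-1], {})[w[-1]] = c  (in-place bucket
-- mutation = overwriting model[w[:-1]] with the updated bucket)
def build_n_gram_alt (sequence : List String) (n : Int) : List (List String × List (String × Int)) :=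
  if n < 1 then []
  else
    let counts := (PySem.List.pyRange 0 (PySem.List.len sequence - n + 1) 1).foldl
      (fun c i =>
        let w := PySem.List.slice sequence (some i) (some (i + n))
        c.insert w (c.getD w 0 + 1)) PySem.Dict.empty
    (counts.items.foldl
      (fun model p =>
        match PySem.List.pyGet? p.1 (-1) with
        | none => model   -- unreachable: every counted window is nonempty
        | some token =>
          let pfx := PySem.List.slice p.1 none (some (-1))
          let m1 := model.setdefault pfx PySem.Dict.empty
          m1.insert pfx ((m1.getD pfx PySem.Dict.empty).insert token p.2))
      PySem.Dict.empty).items.map (fun p => (p.1, p.2.items))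

-- ===== PRECONDITION & SPEC =====
-- Pre_ excludes exactly the inputs on which A raises IndexError: with n ≤ 0 the token index
-- i + n - 1 reaches below -len(sequence) (always, when the sequence is empty).
def Pre_build_n_gram (sequence : List String) (n : Int) : Prop :=
  1 ≤ n ∨ (sequence ≠ [] ∧ 1 - (sequence.length : Int) ≤ n)
instance (sequence : List String) (n : Int) : Decidable (Pre_build_n_gram sequence n) := by
  unfold Pre_build_n_gram; infer_instance

def pvWitness_build_n_gram : List String × Int := (["a", "b", "a"], 2)

-- On n ≤ 0 (with a sequence long enough that A does not raise) A returns a model counted from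
-- negative-index wraparound tokens; B returns the empty model, the intended value since a text
-- has no n-grams for n ≤ 0.
def D_build_n_gram (sequence : List String) (n : Int) : Prop := n ≤ 0
instance (sequence : List String) (n : Int) : Decidable (D_build_n_gram sequence n) := by
  unfold D_build_n_gram; infer_instance

def Spec_build_n_gram (sequence : List String) (n : Int) (out : List (List String × List (String × Int))) : Prop :=
  ¬ D_build_n_gram sequence n → out = build_n_gram_alt sequence n
instance (sequence : List String) (n : Int) (out : List (List String × List (String × Int))) : Decidable (Spec_build_n_gram sequence n out) := by
  unfold Spec_build_n_gram; infer_instance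

def pvDiffWitness_build_n_gram : List String × Int := (["a"], 0)
def pvDiffWitnessOut_build_n_gram : (List (List String × List (String × Int))) × (List (List String × List (String × Int))) :=
  ([([], [("a", 2)])], [])

-- ===== CLAIM (what is proved, stated in full; the proofs are below) =====
def Claim_unchanged_build_n_gram : Prop := ∀ (sequence : List String) (n : Int), Dom_build_n_gram sequence n → Pre_build_n_gram sequence n → Spec_build_n_gram sequence n (build_n_gram sequence n)
def Claim_changed_build_n_gram : Prop := Dom_build_n_gram (pvDiffWitness_build_n_gram.1) (pvDiffWitness_build_n_gram.2) ∧ Pre_build_n_gram (pvDiffWitness_build_n_gram.1) (pvDiffWitness_build_n_gram.2) ∧ D_build_n_gram (pvDiffWitness_build_n_gram.1) (pvDiffWitness_build_n_gram.2) ∧ build_n_gram (pvDiffWitness_build_n_gram.1) (pvDiffWitness_build_n_gram.2) = pvDiffWitnessOut_build_n_gram.1 ∧ build_n_gram_alt (pvDiffWitness_build_n_gram.1) (pvDiffWitness_build_n_gram.2) = pvDiffWitnessOut_build_n_gram.2 ∧ pvDiffWitnessOut_build_n_gram.1 ≠ pvDiffWitnessOut_build_n_gram.2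
def Claim_exact_build_n_gram : Prop := ∀ (sequence : List String) (n : Int), Dom_build_n_gram sequence n → Pre_build_n_gram sequence n → D_build_n_gram sequence n → build_n_gram sequence n ≠ build_n_gram_alt sequence n

-- ===== LEMMAS AND PROOFS =====

-- the nested model type and the elementary cell write model[p][t] = v
abbrev pvModel : Type := PySem.Dict (List String) (PySem.Dict String Int)

def pvCell (m : pvModel) (p : List String) (t : String) (v : Int) : pvModel :=
  m.insert p ((m.getD p PySem.Dict.empty).insert t v)

-- A's per-window update: increment cell (w.dropLast, w.getLast)
def pvNStep (m : pvModel) (w : List String) : pvModel :=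
  pvCell m w.dropLast (w.getLastD "")
    (((m.getD w.dropLast PySem.Dict.empty).getD (w.getLastD "") 0) + 1)

-- B's per-window update: write cell (w.dropLast, w.getLast) to its final count c w
def pvAStep (c : List String → Int) (m : pvModel) (w : List String) : pvModel :=
  pvCell m w.dropLast (w.getLastD "") (c w)

theorem pvConcat_inj (p l : List String) (t b : String) :
    p ++ [t] = l ++ [b] ↔ p = l ∧ t = b := by
  constructor
  · intro h
    have := List.append_inj' h rfl
    simpa using this
  · rintro ⟨rfl, rfl⟩; rfl

theorem pvNFold_lookup (ws : List (List String)) :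
    ∀ (d : pvModel) (p : List String) (t : String), (∀ w ∈ ws, w ≠ []) →
      ((ws.foldl pvNStep d).getD p PySem.Dict.empty).getD t 0
        = (d.getD p PySem.Dict.empty).getD t 0 + ((ws.count (p ++ [t]) : Nat) : Int) := by
  induction ws with
  | nil => intro d p t _; simp
  | cons w ws ih =>
    intro d p t hne
    have hw : w ≠ [] := hne w List.mem_cons_self
    obtain ⟨l, b, rfl⟩ : ∃ l b, w = l ++ [b] := by
      rcases List.eq_nil_or_concat w with h | ⟨l, b, h⟩
      · exact absurd h hw
      · exact ⟨l, b, by simpa [List.concat_eq_append] using h⟩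
    rw [List.foldl_cons, ih _ p t (fun u hu => hne u (List.mem_cons_of_mem _ hu))]
    have hcnt : ((((l ++ [b]) :: ws).count (p ++ [t]) : Nat) : Int)
        = ((ws.count (p ++ [t]) : Nat) : Int) + (if p = l ∧ t = b then 1 else 0) := by
      rw [List.count_cons]
      by_cases h : p = l ∧ t = b
      · obtain ⟨rfl, rfl⟩ := h; simp
      · have hne' : ¬ (p ++ [t] = l ++ [b]) := by rw [pvConcat_inj]; exact h
        simp only [beq_iff_eq]
        rw [if_neg (fun hc => hne' hc.symm), if_neg h]
        simp
    rw [hcnt]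
    unfold pvNStep pvCell
    rw [List.dropLast_concat, List.getLastD_concat]
    rw [PySem.Dict.getD_insert]
    by_cases hp : p = l
    · subst hp
      rw [if_pos rfl, PySem.Dict.getD_insert]
      by_cases htb : t = b
      · subst htb
        simp only [and_self, if_true]
        ring
      · rw [if_neg htb, if_neg (show ¬(p = p ∧ t = b) from fun hc => htb hc.2)]
        ring
    · rw [if_neg hp, if_neg (show ¬(p = l ∧ t = b) from fun hc => hp hc.1)]
      ring

theorem pvInsert_comm {κ ν : Type} [BEq κ] [LawfulBEq κ] (d : PySem.Dict κ ν) (k k' : κ) (v v' : ν)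
    (hk : d.contains k = true) (hne : k' ≠ k) :
    (d.insert k' v').insert k v = (d.insert k v).insert k' v' := by
  apply PySem.Dict.ext
  have hkk' : (k == k') = false := by simp; exact fun h => hne h.symm
  have hk'k : (k' == k) = false := by simp [hne]
  by_cases hk' : d.contains k' = true
  · rw [PySem.Dict.items_insert_of_contains _ v
        (by rw [PySem.Dict.contains_insert]; simp [hk]),
      PySem.Dict.items_insert_of_contains _ v' hk',
      PySem.Dict.items_insert_of_contains _ v'
        (by rw [PySem.Dict.contains_insert]; simp [hk']),
      PySem.Dict.items_insert_of_contains _ v hk,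
      List.map_map, List.map_map]
    refine List.map_congr_left (fun p _ => ?_)
    simp only [Function.comp_apply]
    by_cases h1 : p.1 = k' <;> by_cases h2 : p.1 = k
    · exact absurd (h1.symm.trans h2) hne
    · simp [h1, hk'k]
    · simp [h2, hkk']
    · simp [h1, h2]
  · rw [PySem.Dict.items_insert_of_contains _ v
        (by rw [PySem.Dict.contains_insert]; simp [hk]),
      PySem.Dict.items_insert_of_not_contains _ v' (by simpa using hk'),
      PySem.Dict.items_insert_of_not_contains _ v'
        (by rw [PySem.Dict.contains_insert]; simp [hk'k]; simpa using hk'),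
      PySem.Dict.items_insert_of_contains _ v hk,
      List.map_append]
    simp [hk'k]

theorem pvEta (w : List String) (hw : w ≠ []) : w.dropLast ++ [w.getLastD ""] = w := by
  rcases List.eq_nil_or_concat w with h | ⟨l, b, h⟩
  · exact absurd h hw
  · subst h; simp [List.concat_eq_append]

theorem pvAStep_cell_comm (c : List String → Int) (m : pvModel) (u w : List String)
    (hu : u ≠ []) (hw : w ≠ []) (hne : u ≠ w)
    (hp : m.contains w.dropLast = true)
    (ht : (m.getD w.dropLast PySem.Dict.empty).contains (w.getLastD "") = true) (v : Int) :
    pvAStep c (pvCell m w.dropLast (w.getLastD "") v) u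
      = pvCell (pvAStep c m u) w.dropLast (w.getLastD "") v := by
  have hnpt : ¬ (u.dropLast = w.dropLast ∧ u.getLastD "" = w.getLastD "") := by
    rintro ⟨h1, h2⟩
    exact hne (by rw [← pvEta u hu, ← pvEta w hw, h1, h2])
  unfold pvAStep pvCell
  by_cases hp' : u.dropLast = w.dropLast
  · have ht' : u.getLastD "" ≠ w.getLastD "" := fun h => hnpt ⟨hp', h⟩
    rw [hp']
    rw [PySem.Dict.getD_insert_self, PySem.Dict.insert_insert_self,
      PySem.Dict.getD_insert_self, PySem.Dict.insert_insert_self,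
      pvInsert_comm _ (w.getLastD "") (u.getLastD "") v (c u) ht ht']
  · rw [PySem.Dict.getD_insert _ _ _ _ _, if_neg hp',
      PySem.Dict.getD_insert _ _ _ _ _, if_neg (fun h => hp' h.symm)]
    rw [pvInsert_comm _ w.dropLast u.dropLast _ _ hp hp']

theorem pvAsm_cell_comm (c : List String → Int) (rest : List (List String)) :
    ∀ (m : pvModel) (w : List String), w ≠ [] → (∀ u ∈ rest, u ≠ []) → w ∉ rest →
      m.contains w.dropLast = true →
      (m.getD w.dropLast PySem.Dict.empty).contains (w.getLastD "") = true →
      ∀ (v : Int),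
      rest.foldl (pvAStep c) (pvCell m w.dropLast (w.getLastD "") v)
        = pvCell (rest.foldl (pvAStep c) m) w.dropLast (w.getLastD "") v := by
  induction rest with
  | nil => intro m w _ _ _ _ _ v; simp
  | cons u rest ih =>
    intro m w hw hne hnotin hp ht v
    have hu : u ≠ [] := hne u List.mem_cons_self
    have hune : u ≠ w := fun h => hnotin (h ▸ List.mem_cons_self)
    rw [List.foldl_cons, List.foldl_cons,
      pvAStep_cell_comm c m u w hu hw hune hp ht v]
    apply ih
    · exact hw
    · exact fun x hx => hne x (List.mem_cons_of_mem _ hx)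
    · exact fun h => hnotin (List.mem_cons_of_mem _ h)
    · unfold pvAStep pvCell
      rw [PySem.Dict.contains_insert]
      simp [hp]
    · unfold pvAStep pvCell
      by_cases hp' : u.dropLast = w.dropLast
      · rw [hp', PySem.Dict.getD_insert_self, PySem.Dict.contains_insert, ht]
        simp
      · rw [PySem.Dict.getD_insert _ _ _ _ _, if_neg (fun h => hp' h.symm)]
        exact ht

theorem pvCell_cell (m : pvModel) (p : List String) (t : String) (a b : Int) :
    pvCell (pvCell m p t a) p t b = pvCell m p t b := by
  unfold pvCell
  rw [PySem.Dict.getD_insert_self, PySem.Dict.insert_insert_self, PySem.Dict.insert_insert_self]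

theorem pvN_eq_asm (ws : List (List String)) (h : ∀ w ∈ ws, w ≠ []) :
    ws.foldl pvNStep PySem.Dict.empty
      = (PySem.Set.ofList ws).foldl (pvAStep (fun u => ((ws.count u : Nat) : Int))) PySem.Dict.empty := by
  induction ws using List.reverseRecOn with
  | nil => simp [PySem.Set.ofList]
  | append_singleton ws w ih =>
    have hw : w ≠ [] := h w (by simp)
    have hws : ∀ u ∈ ws, u ≠ [] := fun u hu => h u (by simp [hu])
    have ihh := ih hws
    -- names
    set p := w.dropLast with hp
    set t := w.getLastD "" with htt
    have hγ : ((ws.foldl pvNStep PySem.Dict.empty).getD p PySem.Dict.empty).getD t 0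
        = ((ws.count w : Nat) : Int) := by
      rw [pvNFold_lookup ws PySem.Dict.empty p t hws, hp, htt, pvEta w hw]
      simp
    have hLHS : (ws ++ [w]).foldl pvNStep PySem.Dict.empty
        = pvCell (ws.foldl pvNStep PySem.Dict.empty) p t (((ws.count w : Nat) : Int) + 1) := by
      rw [List.foldl_append]
      simp only [List.foldl_cons, List.foldl_nil]
      rw [show pvNStep (List.foldl pvNStep PySem.Dict.empty ws) w
          = pvCell (List.foldl pvNStep PySem.Dict.empty ws) p t
              (((List.foldl pvNStep PySem.Dict.empty ws).getD p PySem.Dict.empty).getD t 0 + 1) from rfl,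
        hγ]
    have hcnt' : ∀ u, u ≠ w → (((ws ++ [w]).count u : Nat) : Int) = ((ws.count u : Nat) : Int) := by
      intro u hune
      rw [List.count_append]
      have h0 : [w].count u = 0 := by
        simp [List.count_cons]
        exact fun hh => hune hh.symm
      rw [h0]
      simp
    have hcntw : (((ws ++ [w]).count w : Nat) : Int) = ((ws.count w : Nat) : Int) + 1 := by
      rw [List.count_append]
      simp
    rw [hLHS, ihh, PySem.Set.ofList_append_singleton]
    by_cases hmem : w ∈ PySem.Set.ofList ws
    · -- w already seen: overwrite its cell in place, commuted past the tail of the fold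
      rw [PySem.Set.add_of_mem hmem]
      obtain ⟨s1, s2, hus⟩ := List.append_of_mem hmem
      have hnd := PySem.Set.nodup_ofList (α := List String) ws
      rw [hus] at hnd
      obtain ⟨hnd1, hnd2, hdisj⟩ := List.nodup_append.mp hnd
      have hw1 : w ∉ s1 := fun hmem1 => (hdisj w hmem1 w List.mem_cons_self) rfl
      have hw2 : w ∉ s2 := (List.nodup_cons.mp hnd2).1
      have hs2ne : ∀ u ∈ s2, u ≠ [] := by
        intro u hu
        have : u ∈ ws := (PySem.Set.mem_ofList ws u).mp (by rw [hus]; simp [hu])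
        exact hws u this
      rw [hus, List.foldl_append, List.foldl_cons, List.foldl_append, List.foldl_cons]
      have hcongr1 : s1.foldl (pvAStep (fun u => (((ws ++ [w]).count u : Nat) : Int))) PySem.Dict.empty
          = s1.foldl (pvAStep (fun u => ((ws.count u : Nat) : Int))) PySem.Dict.empty := by
        apply PySem.List.foldl_congr_mem
        intro acc x hx
        unfold pvAStep
        beta_reduce
        rw [hcnt' x (fun hh => hw1 (hh ▸ hx))]
      rw [hcongr1]
      set M1 := s1.foldl (pvAStep (fun u => ((ws.count u : Nat) : Int))) PySem.Dict.empty with hM1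
      have hstepw : pvAStep (fun u => (((ws ++ [w]).count u : Nat) : Int)) M1 w
          = pvCell (pvAStep (fun u => ((ws.count u : Nat) : Int)) M1 w) p t (((ws.count w : Nat) : Int) + 1) := by
        unfold pvAStep
        beta_reduce
        rw [hcntw, pvCell_cell]
      rw [hstepw]
      have hcongr2 : ∀ (m0 : pvModel),
          s2.foldl (pvAStep (fun u => (((ws ++ [w]).count u : Nat) : Int))) m0
          = s2.foldl (pvAStep (fun u => ((ws.count u : Nat) : Int))) m0 := by
        intro m0
        apply PySem.List.foldl_congr_mem
        intro acc x hx
        unfold pvAStep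
        beta_reduce
        rw [hcnt' x (fun hh => hw2 (hh ▸ hx))]
      rw [hcongr2]
      set M2 := pvAStep (fun u => ((ws.count u : Nat) : Int)) M1 w with hM2
      have hcont1 : M2.contains p = true := by
        rw [hM2]; unfold pvAStep pvCell
        rw [PySem.Dict.contains_insert]
        simp [hp]
      have hcont2 : (M2.getD p PySem.Dict.empty).contains t = true := by
        rw [hM2]; unfold pvAStep pvCell
        rw [hp, PySem.Dict.getD_insert_self, PySem.Dict.contains_insert]
        simp [htt]
      rw [pvAsm_cell_comm _ s2 M2 w hw hs2ne hw2 hcont1 hcont2]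
    · -- w new: its single write appends at the end
      rw [PySem.Set.add_of_not_mem hmem, List.foldl_append]
      simp only [List.foldl_cons, List.foldl_nil]
      have hcongr : (PySem.Set.ofList ws).foldl (pvAStep (fun u => (((ws ++ [w]).count u : Nat) : Int))) PySem.Dict.empty
          = (PySem.Set.ofList ws).foldl (pvAStep (fun u => ((ws.count u : Nat) : Int))) PySem.Dict.empty := by
        apply PySem.List.foldl_congr_mem
        intro acc x hx
        unfold pvAStep
        beta_reduce
        rw [hcnt' x (fun hh => hmem (hh ▸ hx))]
      rw [hcongr]
      unfold pvAStep
      beta_reduce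
      rw [hcntw]

theorem pvStep_core_eq (d : pvModel) (key : List String) (token : String) :
    ((if d.contains key then d else d.insert key PySem.Dict.empty).insert key
      (((if d.contains key then d else d.insert key PySem.Dict.empty).getD key PySem.Dict.empty).insert token
        (((if d.contains key then d else d.insert key PySem.Dict.empty).getD key PySem.Dict.empty).getD token 0 + 1)))
    = pvCell d key token ((d.getD key PySem.Dict.empty).getD token 0 + 1) := by
  unfold pvCell
  by_cases hc : d.contains key
  · simp [hc]
  · simp only [Bool.not_eq_true] at hc
    simp [hc, PySem.Dict.getD_insert_self, PySem.Dict.getD_of_not_contains d _ hc,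
      PySem.Dict.insert_insert_self]

theorem pvSetdefault_core_eq (m : pvModel) (p : List String) (t : String) (v : Int) :
    ((m.setdefault p PySem.Dict.empty).insert p
      (((m.setdefault p PySem.Dict.empty).getD p PySem.Dict.empty).insert t v))
    = pvCell m p t v := by
  unfold pvCell
  by_cases hc : m.contains p
  · rw [PySem.Dict.setdefault_of_contains _ _ hc]
  · simp only [Bool.not_eq_true] at hc
    rw [PySem.Dict.setdefault_of_not_contains _ _ hc]
    simp [PySem.Dict.getD_insert_self, PySem.Dict.getD_of_not_contains m _ hc,
      PySem.Dict.insert_insert_self]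

theorem pvFoldA_eq_nfold (seq : List String) (m : Nat) (hm : 1 ≤ m) :
    ∀ (js : List Nat), (∀ j ∈ js, j + m ≤ seq.length) →
    ∀ (d : pvModel),
      (js.map (Nat.cast : Nat → Int)).foldl
        (fun ngram i =>
          let key := PySem.List.slice seq (some i) (some (i + (m : Int) - 1))
          match PySem.List.pyGet? seq (i + ((m : Int) - 1)) with
          | none => ngram
          | some token =>
            let ngram1 := if ngram.contains key then ngram else ngram.insert key PySem.Dict.empty
            let inner := ngram1.getD key PySem.Dict.empty
            ngram1.insert key (inner.insert token (inner.getD token 0 + 1))) d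
      = (js.map (fun j => (seq.drop j).take m)).foldl pvNStep d := by
  intro js
  induction js with
  | nil => intro _ d; simp
  | cons j js ih =>
    intro hmem d
    have hj : j + m ≤ seq.length := hmem j List.mem_cons_self
    have hidx : j + (m - 1) < seq.length := by omega
    have hcast : ((j : Int) + (m : Int) - 1) = ((j + (m - 1) : Nat) : Int) := by push_cast; omega
    have hcast2 : ((j : Int) + ((m : Int) - 1)) = ((j + (m - 1) : Nat) : Int) := by push_cast; omega
    have hwlen : ((seq.drop j).take m).length = m := by
      simp [List.length_take, List.length_drop]; omega
    have hkey : PySem.List.slice seq (some (j : Int)) (some ((j : Int) + (m : Int) - 1))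
        = ((seq.drop j).take m).dropLast := by
      rw [hcast, PySem.List.slice_natCast, List.dropLast_eq_take, hwlen, List.take_take]
      congr 1
      omega
    have htok : PySem.List.pyGet? seq ((j : Int) + ((m : Int) - 1))
        = some (seq[j + (m - 1)]'hidx) := by
      rw [hcast2, PySem.List.pyGet?_natCast, List.getElem?_eq_getElem hidx]
    have hlastD : ((seq.drop j).take m).getLastD "" = seq[j + (m - 1)]'hidx := by
      rw [List.getLastD_eq_getLast?, List.getLast?_eq_getElem?, hwlen]
      rw [List.getElem?_take_of_lt (by omega), List.getElem?_drop, List.getElem?_eq_getElem (by omega)]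
      rfl
    rw [List.map_cons, List.map_cons, List.foldl_cons, List.foldl_cons]
    simp only [hkey, htok]
    rw [pvStep_core_eq d _ _]
    rw [show pvNStep d ((seq.drop j).take m)
        = pvCell d ((seq.drop j).take m).dropLast (((seq.drop j).take m).getLastD "")
            (((d.getD ((seq.drop j).take m).dropLast PySem.Dict.empty).getD
              (((seq.drop j).take m).getLastD "") 0) + 1) from rfl, hlastD]
    exact ih (fun x hx => hmem x (List.mem_cons_of_mem _ hx)) _

theorem pvBStep_eq (m : pvModel) (w : List String) (c : List String → Int) (hw : w ≠ []) :
    (match PySem.List.pyGet? w (-1) with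
     | none => m
     | some token =>
       (m.setdefault (PySem.List.slice w none (some (-1))) PySem.Dict.empty).insert
         (PySem.List.slice w none (some (-1)))
         (((m.setdefault (PySem.List.slice w none (some (-1))) PySem.Dict.empty).getD
             (PySem.List.slice w none (some (-1))) PySem.Dict.empty).insert token (c w)))
    = pvAStep c m w := by
  have hget : PySem.List.pyGet? w (-1) = some (w.getLastD "") := by
    rw [PySem.List.pyGet?_neg_one]
    rcases List.eq_nil_or_concat w with h | ⟨l, b, h⟩
    · exact absurd h hw
    · subst h; simp [List.concat_eq_append]
  rw [hget]
  simp only [PySem.List.slice_to_neg_one]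
  rw [pvSetdefault_core_eq]
  rfl

theorem pvRange_eq (seq : List String) (m : Nat) (b : Int) (hb : b = PySem.List.len seq - ((m : Int) - 1)) :
    PySem.List.pyRange 0 b 1 = (List.range (seq.length + 1 - m)).map (Nat.cast : Nat → Int) := by
  subst hb
  by_cases h : m ≤ seq.length + 1
  · have h1 : PySem.List.len seq - ((m : Int) - 1) = ((seq.length + 1 - m : Nat) : Int) := by
      simp [PySem.List.len_eq]; omega
    rw [h1, PySem.List.pyRange_zero_natCast]
  · have h0 : seq.length + 1 - m = 0 := by omega
    rw [h0]
    simp [PySem.List.pyRange, PySem.List.len_eq]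
    omega

theorem pvInsert_items_ne_nil {κ ν : Type} [BEq κ] [LawfulBEq κ] (d : PySem.Dict κ ν) (k : κ) (v : ν) :
    (d.insert k v).items ≠ [] := by
  by_cases hc : d.contains k
  · rw [PySem.Dict.items_insert_of_contains d v hc]
    intro h
    simp only [List.map_eq_nil_iff] at h
    have hk : k ∈ d.keys := (PySem.Dict.contains_iff_mem_keys d k).mp hc
    simp [PySem.Dict.keys, h] at hk
  · rw [PySem.Dict.items_insert_of_not_contains d v (by simpa using hc)]
    simp

theorem pvFoldA_ne_nil (seq : List String) (n : Int) :
    ∀ (js : List Int) (d : pvModel), d.items ≠ [] →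
      (js.foldl
        (fun ngram i =>
          let key := PySem.List.slice seq (some i) (some (i + n - 1))
          match PySem.List.pyGet? seq (i + (n - 1)) with
          | none => ngram
          | some token =>
            let ngram1 := if ngram.contains key then ngram else ngram.insert key PySem.Dict.empty
            let inner := ngram1.getD key PySem.Dict.empty
            ngram1.insert key (inner.insert token (inner.getD token 0 + 1))) d).items ≠ [] := by
  intro js
  induction js with
  | nil => intro d h; simpa using h
  | cons i js ih =>
    intro d h
    rw [List.foldl_cons]
    apply ih
    cases hg : PySem.List.pyGet? seq (i + (n - 1)) with
    | none => exact h
    | some tok => exact pvInsert_items_ne_nil _ _ _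

-- ===== VERDICT (by name: the statement is the Claim_ definition above) =====
theorem pvWs_ne_nil (seq : List String) (m : Nat) (hm : 1 ≤ m) :
    ∀ w ∈ (List.range (seq.length + 1 - m)).map (fun j => (seq.drop j).take m), w ≠ [] := by
  intro w hw
  simp only [List.mem_map, List.mem_range] at hw
  obtain ⟨j, hj, rfl⟩ := hw
  have : ((seq.drop j).take m).length = m := by
    simp [List.length_take, List.length_drop]; omega
  intro hnil
  rw [hnil] at this
  simp at this
  omega

theorem build_n_gram_spec : Claim_unchanged_build_n_gram := by
  intro seq n hdom hpre
  unfold Spec_build_n_gram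
  intro hnD
  unfold D_build_n_gram at hnD
  obtain ⟨m, rfl⟩ : ∃ m : Nat, n = (m : Int) := ⟨n.toNat, (Int.toNat_of_nonneg (by omega)).symm⟩
  have hm : 1 ≤ m := by omega
  set K := seq.length + 1 - m with hK
  set ws := (List.range K).map (fun j => (seq.drop j).take m) with hws
  have hwsne : ∀ w ∈ ws, w ≠ [] := pvWs_ne_nil seq m hm
  -- A's side reduces to the incremental nested fold over the windows
  have hA : build_n_gram seq (m : Int)
      = (ws.foldl pvNStep PySem.Dict.empty).items.map (fun p => (p.1, p.2.items)) := by
    have h0 : build_n_gram seq (m : Int)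
        = (((List.range K).map (Nat.cast : Nat → Int)).foldl
            (fun (ngram : pvModel) (i : Int) =>
              let key := PySem.List.slice seq (some i) (some (i + (m : Int) - 1))
              match PySem.List.pyGet? seq (i + ((m : Int) - 1)) with
              | none => ngram
              | some token =>
                let ngram1 := if ngram.contains key then ngram else ngram.insert key PySem.Dict.empty
                let inner := ngram1.getD key PySem.Dict.empty
                ngram1.insert key (inner.insert token (inner.getD token 0 + 1)))
            PySem.Dict.empty).items.map (fun p => (p.1, p.2.items)) := by
      unfold build_n_gram
      rw [pvRange_eq seq m _ rfl]
    rw [h0, pvFoldA_eq_nfold seq m hm (List.range K)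
      (fun j hj => by have := List.mem_range.mp hj; omega) PySem.Dict.empty]
  -- B's side reduces to one write per distinct window, from the flat counter
  have hcounts : ((List.range K).map (Nat.cast : Nat → Int)).foldl
      (fun (c : PySem.Dict (List String) Int) i =>
        let w := PySem.List.slice seq (some i) (some (i + (m : Int)))
        c.insert w (c.getD w 0 + 1)) PySem.Dict.empty
      = PySem.Dict.counter ws := by
    rw [List.foldl_map]
    have hcg : (List.range K).foldl
        (fun (c : PySem.Dict (List String) Int) (j : Nat) =>
          let w := PySem.List.slice seq (some (j : Int)) (some ((j : Int) + (m : Int)))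
          c.insert w (c.getD w 0 + 1)) PySem.Dict.empty
        = (List.range K).foldl
        (fun (c : PySem.Dict (List String) Int) (j : Nat) =>
          c.insert ((seq.drop j).take m) (c.getD ((seq.drop j).take m) 0 + 1)) PySem.Dict.empty := by
      apply PySem.List.foldl_congr_mem
      intro acc j hj
      have hjK : j < K := List.mem_range.mp hj
      have hslice : PySem.List.slice seq (some (j : Int)) (some ((j : Int) + (m : Int)))
          = (seq.drop j).take m := by
        have hcast : ((j : Int) + (m : Int)) = ((j + m : Nat) : Int) := by push_cast; ring
        rw [hcast, PySem.List.slice_natCast]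
        congr 1
        omega
      simp only [hslice]
    rw [hcg, hws, ← List.foldl_map (f := fun j => (seq.drop j).take m)
      (g := fun (c : PySem.Dict (List String) Int) w => c.insert w (c.getD w 0 + 1)),
      PySem.Dict.foldl_insert_getD_add_one_eq_counter]
  have hB : build_n_gram_alt seq (m : Int)
      = ((PySem.Set.ofList ws).foldl (pvAStep (fun u => ((ws.count u : Nat) : Int)))
          PySem.Dict.empty).items.map (fun p => (p.1, p.2.items)) := by
    have h0 : build_n_gram_alt seq (m : Int)
        = (((PySem.Dict.counter ws).items).foldl
            (fun (model : pvModel) (p : List String × Int) =>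
              match PySem.List.pyGet? p.1 (-1) with
              | none => model
              | some token =>
                let pfx := PySem.List.slice p.1 none (some (-1))
                let m1 := model.setdefault pfx PySem.Dict.empty
                m1.insert pfx ((m1.getD pfx PySem.Dict.empty).insert token p.2))
            PySem.Dict.empty).items.map (fun p => (p.1, p.2.items)) := by
      unfold build_n_gram_alt
      rw [if_neg (by omega),
        pvRange_eq seq m (PySem.List.len seq - (m : Int) + 1) (by ring), hcounts]
    rw [h0, PySem.Dict.items_counter, List.foldl_map]
    apply congrArg (fun (d : pvModel) => d.items.map (fun p => (p.1, p.2.items)))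
    apply PySem.List.foldl_congr_mem
    intro acc k hk
    have hkne : k ≠ [] := hwsne k ((PySem.Set.mem_ofList ws k).mp hk)
    exact pvBStep_eq acc k (fun u => ((ws.count u : Nat) : Int)) hkne
  rw [hA, hB, pvN_eq_asm ws hwsne]

theorem build_n_gram_changed : Claim_changed_build_n_gram := by
  unfold Claim_changed_build_n_gram; decide

theorem build_n_gram_tight : Claim_exact_build_n_gram := by
  intro seq n hdom hpre hD
  unfold D_build_n_gram at hD
  unfold Pre_build_n_gram at hpre
  obtain ⟨hne, hge⟩ : seq ≠ [] ∧ 1 - (seq.length : Int) ≤ n := by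
    rcases hpre with h | h
    · omega
    · exact h
  have hlen : 1 ≤ seq.length := List.length_pos_iff.mpr hne
  have hB : build_n_gram_alt seq n = [] := by
    unfold build_n_gram_alt
    rw [if_pos (by omega)]
  rw [hB]
  unfold build_n_gram
  have hb : (0 : Int) < PySem.List.len seq - (n - 1) := by simp [PySem.List.len_eq]; omega
  rw [PySem.List.pyRange_one_cons hb]
  simp only [List.foldl_cons]
  cases hg : PySem.List.pyGet? seq (0 + (n - 1)) with
  | none =>
    rw [PySem.List.pyGet?_eq_none_iff] at hg
    exfalso
    apply hg
    simp [PySem.Raise.InRange]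
    omega
  | some tok =>
    simp only [PySem.Dict.contains_empty, Bool.false_eq_true, if_false]
    intro hcontra
    rw [List.map_eq_nil_iff] at hcontra
    exact pvFoldA_ne_nil seq n _ _ (pvInsert_items_ne_nil _ _ _) hcontra
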